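-- pv_equiv track=rewrite | github.com/Cellular-Semantics/Brain_Cell_KG | src/utils/update_kg.py | split_cypher_statements
-- ===== SOURCE A (Python) =====
-- def split_cypher_statements(query_text):
--     """
--     Split Cypher query text into individual statements.
--     Handles semicolon delimiters while preserving statements with embedded semicolons in strings.
--     """
--     if not query_text.strip():
--         return []
--
--     statements = []
--     current_statement = ""
--     in_string = False
--     string_char = None
--     i = 0
--
--     while i < len(query_text):
--         char = query_text[i]
--
--         # Handle string literals (single or double quotes)
--         if char in ('"', "'") and (i == 0 or query_text[i-1] != '\\'):
--             if not in_string: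
--                 in_string = True
--                 string_char = char
--             elif char == string_char:
--                 in_string = False
--                 string_char = None
--
--         # Handle semicolon delimiters
--         elif char == ';' and not in_string:
--             if current_statement.strip():
--                 statements.append(current_statement.strip())
--             current_statement = ""
--             i += 1
--             continue
--
--         current_statement += char
--         i += 1
--
--     # Add the last statement if it exists
--     if current_statement.strip():
--         statements.append(current_statement.strip())
--
--     # Filter out comments-only statements
--     filtered_statements = []
--     for stmt in statements:
--         # Remove single-line comments and check if anything remains
--         lines = stmt.split('\n')
--         non_comment_lines = [line.strip() for line in lines
--                            if line.strip() and not line.strip().startswith('//')]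
--         if non_comment_lines:
--             filtered_statements.append(stmt)
--
--     return filtered_statements
-- ===== SOURCE B (Python) =====
-- def _comments_only(stmt):
--     return all(
--         (not ln.strip()) or ln.strip().startswith('//')
--         for ln in stmt.split('\n')
--     )
--
--
-- def split_cypher_statements(query_text):
--     """
--     Split Cypher query text into statements: collect the indices of the
--     top-level semicolons (skipping over quoted string literals as opaque
--     spans), slice the text at those indices, then strip each slice, drop
--     empties and drop comment-only statements.
--     """
--     n = len(query_text)
--     cuts = []
--     i = 0
--     while i < n:
--         c = query_text[i]
--         if c in '"\'' and (i == 0 or query_text[i - 1] != '\\'):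
--             # skip the whole string literal as an opaque span
--             i += 1
--             while i < n and not (query_text[i] == c and query_text[i - 1] != '\\'):
--                 i += 1
--             i += 1  # step past the closing quote
--         elif c == ';':
--             cuts.append(i)
--             i += 1
--         else:
--             i += 1
--
--     result = []
--     start = 0
--     for cut in cuts + [n]:
--         stmt = query_text[start:cut].strip()
--         start = cut + 1
--         if stmt and not _comments_only(stmt):
--             result.append(stmt)
--     return result
-- ===== Notes on version B (the rewrite author's own statement) =====
-- stated objective: faster
-- what changed: A accumulates characters one by one into a growing current_statement string with in_string/string_char state; B instead first collects the indices of all top-level semicolons (skipping each quoted literal as an opaque span with an inner scan) and then slices the text at those indices, applying the same strip/empty/comment-only post-processing to the slices.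
import Mathlib
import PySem

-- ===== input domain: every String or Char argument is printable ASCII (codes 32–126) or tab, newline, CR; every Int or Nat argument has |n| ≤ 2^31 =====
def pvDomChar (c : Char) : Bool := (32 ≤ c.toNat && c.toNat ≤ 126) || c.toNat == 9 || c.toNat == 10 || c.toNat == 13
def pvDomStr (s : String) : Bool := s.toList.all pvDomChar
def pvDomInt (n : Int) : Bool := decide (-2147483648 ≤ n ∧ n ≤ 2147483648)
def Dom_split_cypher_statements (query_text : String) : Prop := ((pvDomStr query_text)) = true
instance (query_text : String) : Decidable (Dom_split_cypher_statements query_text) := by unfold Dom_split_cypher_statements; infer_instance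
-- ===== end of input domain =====

-- B replaces A's char-by-char statement accumulation by a two-phase split — collect the indices of
-- top-level semicolons while skipping quoted literals as opaque spans, then slice the text at those
-- indices — a different decomposition of the same exact behaviour, avoiding A's quadratic
-- character-by-character string concatenation (objective: faster; measured).

-- ===== PORT A =====
-- keep a statement iff some line remains after dropping blank and '//' lines (A's filter loop)
def aKeep (stmt : List Char) : Bool :=
  !((PySem.Chars.splitOn stmt ['\n']).filterMap (fun line =>
      let t := PySem.Chars.strip line
      if t ≠ [] ∧ ¬ PySem.Chars.startswith t ['/', '/'] then some t else none)).isEmpty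

-- A's while-loop: state (statements, current_statement, in_string, string_char), prev = query_text[i-1]
def aLoop : List Char → Option Char → List (List Char) → List Char → Bool → Option Char → List (List Char)
  | [], _, stmts, cur, _, _ =>
      if PySem.Chars.strip cur ≠ [] then stmts ++ [PySem.Chars.strip cur] else stmts
  | c :: rest, prev, stmts, cur, inStr, strCh =>
      if (c = '"' ∨ c = '\'') ∧ prev ≠ some '\\' then
        let st : Bool × Option Char :=
          if !inStr then (true, some c)
          else if strCh = some c then (false, none)
          else (inStr, strCh)
        aLoop rest (some c) stmts (cur ++ [c]) st.1 st.2
      else if c = ';' ∧ inStr = false then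
        aLoop rest (some c)
          (if PySem.Chars.strip cur ≠ [] then stmts ++ [PySem.Chars.strip cur] else stmts)
          [] inStr strCh
      else
        aLoop rest (some c) stmts (cur ++ [c]) inStr strCh

def split_cypher_statements (query_text : String) : List String :=
  if PySem.Chars.strip query_text.toList = [] then []
  else ((aLoop query_text.toList none [] [] false none).filter aKeep).map String.mk

-- ===== PORT B =====
-- all non-blank lines start with '//' (B's _comments_only)
def bCommentsOnly (stmt : List Char) : Bool :=
  (PySem.Chars.splitOn stmt ['\n']).all (fun line =>
    (PySem.Chars.strip line).isEmpty ||
      PySem.Chars.startswith (PySem.Chars.strip line) ['/', '/'])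

-- B's inner while: index of the closing quote (s.length if unclosed)
def bQEnd (s : List Char) (q : Char) (i : Nat) : Nat :=
  if _h : i < s.length then
    if s.getD i ' ' = q ∧ s.getD (i - 1) ' ' ≠ '\\' then i else bQEnd s q (i + 1)
  else i
termination_by s.length - i
decreasing_by omega

theorem bQEnd_ge (s : List Char) (q : Char) (i : Nat) : i ≤ bQEnd s q i := by
  fun_induction bQEnd s q i <;> omega

-- B's first pass: indices of the top-level semicolons from position i on
def bCuts (s : List Char) (i : Nat) : List Nat :=
  if _h : i < s.length then
    let c := s.getD i ' '
    if (c = '"' ∨ c = '\'') ∧ (i = 0 ∨ s.getD (i - 1) ' ' ≠ '\\') then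
      bCuts s (bQEnd s c (i + 1) + 1)
    else if c = ';' then i :: bCuts s (i + 1)
    else bCuts s (i + 1)
  else []
termination_by s.length - i
decreasing_by
  · have := bQEnd_ge s (s.getD i ' ') (i + 1); omega
  · omega
  · omega

-- B's second pass: slice at each cut, strip, keep non-empty non-comment statements
def bBuild (s : List Char) (cuts : List Nat) (start : Nat) : List String :=
  match cuts with
  | [] => []
  | cut :: rest =>
      let stmt := PySem.Chars.strip (PySem.List.slice s (some (start : Int)) (some (cut : Int)))
      let tail := bBuild s rest (cut + 1)
      if stmt ≠ [] ∧ bCommentsOnly stmt = false then String.mk stmt :: tail else tail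

def split_cypher_statements_alt (query_text : String) : List String :=
  let s := query_text.toList
  bBuild s (bCuts s 0 ++ [s.length]) 0

-- ===== PRECONDITION & SPEC =====
def Spec_split_cypher_statements (query_text : String) (out : List String) : Prop := out = split_cypher_statements_alt query_text
instance (query_text : String) (out : List String) : Decidable (Spec_split_cypher_statements query_text out) := by unfold Spec_split_cypher_statements; infer_instance

-- ===== CLAIM (what is proved, stated in full; the proofs are below) =====
def Claim_equal_split_cypher_statements : Prop := ∀ (query_text : String), Dom_split_cypher_statements query_text → Spec_split_cypher_statements query_text (split_cypher_statements query_text)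

-- ===== LEMMAS AND PROOFS =====

-- the raw (unstripped) pieces A's loop walks through, with the current buffer `cur` as prefix
def pieces : List Char → List Char → Option Char → Bool → Option Char → List (List Char)
  | cur, [], _, _, _ => [cur]
  | cur, c :: rest, prev, inStr, strCh =>
      if (c = '"' ∨ c = '\'') ∧ prev ≠ some '\\' then
        let st : Bool × Option Char :=
          if !inStr then (true, some c)
          else if strCh = some c then (false, none)
          else (inStr, strCh)
        pieces (cur ++ [c]) rest (some c) st.1 st.2
      else if c = ';' ∧ inStr = false then
        cur :: pieces [] rest (some c) inStr strCh
      else pieces (cur ++ [c]) rest (some c) inStr strCh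

-- the slices B takes at a cut list
def segsFrom (s : List Char) : List Nat → Nat → List (List Char)
  | [], start => [s.drop start]
  | k :: rest, start => (s.drop start).take (k - start) :: segsFrom s rest (k + 1)

def mapHead (f : List Char → List Char) : List (List Char) → List (List Char)
  | [] => []
  | h :: t => f h :: t

-- cut list is ascending, in range, starting at `start`
def CutsLE (s : List Char) : List Nat → Nat → Prop
  | [], _ => True
  | k :: rest, start => start ≤ k ∧ k < s.length ∧ CutsLE s rest (k + 1)

theorem aLoop_pieces (rest : List Char) : ∀ (prev : Option Char) (stmts : List (List Char))
    (cur : List Char) (inStr : Bool) (strCh : Option Char),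
    aLoop rest prev stmts cur inStr strCh
      = stmts ++ ((pieces cur rest prev inStr strCh).map PySem.Chars.strip).filter
          (fun t => !t.isEmpty) := by
  
  induction rest with
  | nil =>
      intro prev stmts cur inStr strCh
      by_cases h : PySem.Chars.strip cur = []
      · simp [aLoop, pieces, h]
      · have hne : (PySem.Chars.strip cur).isEmpty = false := by simp [h]
        simp [aLoop, pieces, h, hne]
  | cons c rest ih =>
      intro prev stmts cur inStr strCh
      by_cases h1 : (c = '"' ∨ c = '\'') ∧ prev ≠ some '\\'
      · simp only [aLoop, pieces, if_pos h1]
        exact ih _ _ _ _ _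
      · by_cases h2 : c = ';' ∧ inStr = false
        · simp only [aLoop, pieces, if_neg h1, if_pos h2]
          rw [ih]
          by_cases h : PySem.Chars.strip cur = []
          · simp [h]
          · have hne : (PySem.Chars.strip cur).isEmpty = false := by simp [h]
            simp [h, hne]
        · simp only [aLoop, pieces, if_neg h1, if_neg h2]
          exact ih _ _ _ _ _

theorem drop_split {α : Type} (s : List α) (i j : Nat) (h : i ≤ j) :
    s.drop i = (s.drop i).take (j - i) ++ s.drop j := by
  
  conv_lhs => rw [← List.take_append_drop (j - i) (s.drop i)]
  rw [List.drop_drop, Nat.add_sub_cancel' h]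

theorem take_split {α : Type} (s : List α) (i j k : Nat) (h1 : i ≤ j) (h2 : j ≤ k) :
    (s.drop i).take (k - i) = (s.drop i).take (j - i) ++ (s.drop j).take (k - j) := by
  
  have e : k - i = (j - i) + (k - j) := by omega
  rw [e, List.take_add, List.drop_drop, Nat.add_sub_cancel' h1]

theorem segsFrom_shift (s : List Char) (cuts : List Nat) (cur : List Char) (i j : Nat)
    (h : i ≤ j) (hk : ∀ k ∈ cuts, j ≤ k) :
    mapHead (cur ++ ·) (segsFrom s cuts i)
      = mapHead ((cur ++ (s.drop i).take (j - i)) ++ ·) (segsFrom s cuts j) := by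
  
  cases cuts with
  | nil =>
      simp only [segsFrom, mapHead]
      rw [List.append_assoc, ← drop_split s i j h]
  | cons k rest =>
      simp only [segsFrom, mapHead]
      rw [List.append_assoc, ← take_split s i j k h (hk k (List.mem_cons_self))]

theorem bQEnd_close (s : List Char) (q : Char) (i : Nat) (h : bQEnd s q i < s.length) :
    s.getD (bQEnd s q i) ' ' = q := by
  
  fun_induction bQEnd s q i with
  | case1 i h1 h2 => exact h2.1
  | case2 i h1 h2 ih => exact ih h
  | case3 i h1 => omega

theorem bCuts_mem (s : List Char) (i : Nat) : ∀ k ∈ bCuts s i, i ≤ k ∧ k < s.length := by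
  
  fun_induction bCuts s i with
  | case1 i h1 c hg ih =>
      intro k hk
      have := ih k hk
      have := bQEnd_ge s c (i + 1)
      omega
  | case2 i h1 c hg hsemi ih =>
      intro k hk
      rcases List.mem_cons.1 hk with rfl | hk
      · omega
      · have := ih k hk; omega
  | case3 i h1 c hg hsemi ih =>
      intro k hk; have := ih k hk; omega
  | case4 i h1 => intro k hk; simp at hk

theorem bCuts_nil (s : List Char) (i : Nat) (h : s.length ≤ i) : bCuts s i = [] := by
  
  unfold bCuts
  rw [dif_neg (by omega)]

theorem CutsLE_of_le (s : List Char) (cuts : List Nat) (i j : Nat) (h : i ≤ j)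
    (hc : CutsLE s cuts j) : CutsLE s cuts i := by
  
  cases cuts with
  | nil => trivial
  | cons k rest =>
      obtain ⟨ha, hb, hcc⟩ := hc
      exact ⟨by omega, hb, hcc⟩

theorem bCuts_cutsLE (s : List Char) (i : Nat) : CutsLE s (bCuts s i) i := by
  
  fun_induction bCuts s i with
  | case1 i h1 c hg ih =>
      exact CutsLE_of_le s _ _ _ (by have := bQEnd_ge s c (i + 1); omega) ih
  | case2 i h1 c hg hsemi ih => exact ⟨le_refl i, h1, ih⟩
  | case3 i h1 c hg hsemi ih => exact CutsLE_of_le s _ _ _ (by omega) ih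
  | case4 i h1 => trivial

theorem mapHead_nil (l : List (List Char)) : mapHead (([] : List Char) ++ ·) l = l := by
  cases l <;> simp [mapHead]

-- in-string span: A's loop swallows everything up to (and including) the closing quote
theorem pieces_str (s : List Char) (q : Char) (hq : q = '"' ∨ q = '\'') (i : Nat) :
    ∀ (cur : List Char), 1 ≤ i →
    pieces cur (s.drop i) (some (s.getD (i - 1) ' ')) true (some q)
      = if bQEnd s q i < s.length then
          pieces (cur ++ (s.drop i).take (bQEnd s q i + 1 - i)) (s.drop (bQEnd s q i + 1))
            (some q) false none
        else [cur ++ s.drop i] := by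
  fun_induction bQEnd s q i with
  | case1 i hlt hcl =>
      intro cur hi
      have hdrop : s.drop i = s[i] :: s.drop (i + 1) := List.drop_eq_getElem_cons hlt
      have hgi : s.getD i ' ' = s[i] := List.getD_eq_getElem s ' ' hlt
      have hq' : s[i] = q := by rw [← hgi]; exact hcl.1
      have h1i : i + 1 - i = 1 := by omega
      rw [if_pos hlt, hdrop]
      simp only [pieces]
      rw [if_pos ⟨by rw [hq']; exact hq, by simpa using hcl.2⟩]
      simp [hq', h1i]
  | case2 i hlt hncl ih =>
      intro cur hi
      have hdrop : s.drop i = s[i] :: s.drop (i + 1) := List.drop_eq_getElem_cons hlt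
      have hgi : s.getD i ' ' = s[i] := List.getD_eq_getElem s ' ' hlt
      have step : pieces cur (s.drop i) (some (s.getD (i - 1) ' ')) true (some q)
          = pieces (cur ++ [s[i]]) (s.drop (i + 1)) (some s[i]) true (some q) := by
        rw [hdrop]
        simp only [pieces]
        by_cases hg : (s[i] = '"' ∨ s[i] = '\'') ∧ some (s.getD (i - 1) ' ') ≠ some '\\'
        · have hne : s[i] ≠ q := fun he => hncl ⟨by rw [hgi, he], by simpa using hg.2⟩
          rw [if_pos hg]
          simp [show ¬(q = s[i]) from fun h => hne h.symm]
        · rw [if_neg hg, if_neg (by simp)]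
      rw [step]
      have ih' := ih (cur ++ [s[i]]) (by omega)
      rw [show i + 1 - 1 = i from by omega, hgi] at ih'
      rw [ih']
      have hge : i + 1 ≤ bQEnd s q (i + 1) := bQEnd_ge s q (i + 1)
      by_cases he : bQEnd s q (i + 1) < s.length
      · rw [if_pos he, if_pos he]
        have ht2 : (s.drop i).take (bQEnd s q (i + 1) - i + 1)
            = s[i] :: (s.drop (i + 1)).take (bQEnd s q (i + 1) - i) := by
          rw [hdrop, List.take_succ_cons]
        simp [show bQEnd s q (i + 1) + 1 - i = bQEnd s q (i + 1) - i + 1 from by omega,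
          show bQEnd s q (i + 1) + 1 - (i + 1) = bQEnd s q (i + 1) - i from by omega, ht2]
      · rw [if_neg he, if_neg he, hdrop]
        simp
  | case3 i hge =>
      intro cur hi
      have hdrop : s.drop i = [] := List.drop_eq_nil_of_le (by omega)
      rw [if_neg (by omega), hdrop]
      simp [pieces]


-- top-level: A's pieces from position i are exactly B's slices at B's cuts
theorem pieces_segs (s : List Char) (i : Nat) :
    ∀ (cur : List Char),
    pieces cur (s.drop i) (if i = 0 then none else some (s.getD (i - 1) ' ')) false none
      = mapHead (cur ++ ·) (segsFrom s (bCuts s i) i) := by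
  fun_induction bCuts s i with
  | case1 i hlt c hg ih =>
      intro cur
      have hdrop : s.drop i = s[i] :: s.drop (i + 1) := List.drop_eq_getElem_cons hlt
      have hgi : s.getD i ' ' = s[i] := List.getD_eq_getElem s ' ' hlt
      have hc : c = s[i] := by rw [show c = s.getD i ' ' from rfl, hgi]
      have hP : (s[i] = '"' ∨ s[i] = '\'') ∧
          (if i = 0 then none else some (s.getD (i - 1) ' ')) ≠ some '\\' := by
        refine ⟨hc ▸ hg.1, ?_⟩
        by_cases h0 : i = 0
        · simp [h0]
        · rcases hg.2 with h0' | hne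
          · exact absurd h0' h0
          · simp only [if_neg h0, ne_eq, Option.some.injEq]
            exact hne
      have step : pieces cur (s.drop i) (if i = 0 then none else some (s.getD (i - 1) ' ')) false none
          = pieces (cur ++ [s[i]]) (s.drop (i + 1)) (some s[i]) true (some s[i]) := by
        rw [hdrop]
        simp only [pieces]
        rw [if_pos hP]
        simp
      rw [step]
      have hstr := pieces_str s s[i] (hc ▸ hg.1) (i + 1) (cur ++ [s[i]]) (by omega)
      rw [show i + 1 - 1 = i from by omega, hgi] at hstr
      rw [hstr]
      rw [hc] at ih ⊢
      have hge : i + 1 ≤ bQEnd s s[i] (i + 1) := bQEnd_ge s s[i] (i + 1)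
      by_cases he : bQEnd s s[i] (i + 1) < s.length
      · rw [if_pos he]
        have hclose : s.getD (bQEnd s s[i] (i + 1)) ' ' = s[i] := bQEnd_close s s[i] (i + 1) he
        have ih' := ih (cur ++ [s[i]] ++ (s.drop (i + 1)).take (bQEnd s s[i] (i + 1) + 1 - (i + 1)))
        rw [if_neg (by omega), show bQEnd s s[i] (i + 1) + 1 - 1 = bQEnd s s[i] (i + 1) from by omega,
          hclose] at ih'
        rw [ih']
        rw [segsFrom_shift s _ cur i (bQEnd s s[i] (i + 1) + 1) (by omega)
          (fun k hk => (bCuts_mem s (bQEnd s s[i] (i + 1) + 1) k hk).1)]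
        have harr : (s.drop i).take (bQEnd s s[i] (i + 1) + 1 - i)
            = s[i] :: (s.drop (i + 1)).take (bQEnd s s[i] (i + 1) + 1 - (i + 1)) := by
          rw [hdrop, show bQEnd s s[i] (i + 1) + 1 - i = (bQEnd s s[i] (i + 1) + 1 - (i + 1)) + 1
            from by omega, List.take_succ_cons]
        rw [harr]
        congr 1
        funext t
        simp
      · rw [if_neg he]
        rw [bCuts_nil s (bQEnd s s[i] (i + 1) + 1) (by omega)]
        simp only [segsFrom, mapHead]
        rw [hdrop]
        simp
  | case2 i hlt c hg hsemi ih =>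
      intro cur
      have hdrop : s.drop i = s[i] :: s.drop (i + 1) := List.drop_eq_getElem_cons hlt
      have hgi : s.getD i ' ' = s[i] := List.getD_eq_getElem s ' ' hlt
      have hc : c = s[i] := by rw [show c = s.getD i ' ' from rfl, hgi]
      have hnP : ¬((s[i] = '"' ∨ s[i] = '\'') ∧
          (if i = 0 then none else some (s.getD (i - 1) ' ')) ≠ some '\\') := by
        intro hP
        apply hg
        refine ⟨hc ▸ hP.1, ?_⟩
        by_cases h0 : i = 0
        · exact Or.inl h0
        · right
          intro hbs
          apply hP.2
          rw [if_neg h0, hbs]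
      rw [hdrop]
      simp only [pieces]
      rw [if_neg hnP, if_pos ⟨hc ▸ hsemi, trivial⟩]
      have ih' := ih []
      rw [if_neg (by omega), show i + 1 - 1 = i from by omega, hgi] at ih'
      rw [ih', mapHead_nil]
      simp [segsFrom, mapHead]
  | case3 i hlt c hg hsemi ih =>
      intro cur
      have hdrop : s.drop i = s[i] :: s.drop (i + 1) := List.drop_eq_getElem_cons hlt
      have hgi : s.getD i ' ' = s[i] := List.getD_eq_getElem s ' ' hlt
      have hc : c = s[i] := by rw [show c = s.getD i ' ' from rfl, hgi]
      have hnP : ¬((s[i] = '"' ∨ s[i] = '\'') ∧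
          (if i = 0 then none else some (s.getD (i - 1) ' ')) ≠ some '\\') := by
        intro hP
        apply hg
        refine ⟨hc ▸ hP.1, ?_⟩
        by_cases h0 : i = 0
        · exact Or.inl h0
        · right
          intro hbs
          apply hP.2
          rw [if_neg h0, hbs]
      rw [hdrop]
      simp only [pieces]
      rw [if_neg hnP, if_neg (by simp [hc ▸ hsemi])]
      have ih' := ih (cur ++ [s[i]])
      rw [if_neg (by omega), show i + 1 - 1 = i from by omega, hgi] at ih'
      rw [ih']
      rw [segsFrom_shift s _ cur i (i + 1) (by omega)
        (fun k hk => (bCuts_mem s (i + 1) k hk).1)]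
      have harr : (s.drop i).take (i + 1 - i) = [s[i]] := by
        rw [hdrop, show i + 1 - i = 1 from by omega]
        rfl
      rw [harr]
  | case4 i hlt =>
      intro cur
      have hdrop : s.drop i = [] := List.drop_eq_nil_of_le (by omega)
      rw [hdrop]
      simp [pieces, segsFrom, mapHead, hdrop]


theorem keep_eq (t : List Char) : aKeep t = !bCommentsOnly t := by
  unfold aKeep bCommentsOnly
  congr 1
  induction PySem.Chars.splitOn t ['\n'] with
  | nil => rfl
  | cons a l ih =>
      simp only [List.filterMap_cons, List.all_cons]
      by_cases h1 : PySem.Chars.strip a = []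
      · simp [h1]
        simpa using ih
      · have hne : (PySem.Chars.strip a).isEmpty = false := by simp [h1]
        by_cases h2 : PySem.Chars.startswith (PySem.Chars.strip a) ['/', '/'] = true
        · simp [h1, h2, hne]
          simpa using ih
        · simp only [Bool.not_eq_true] at h2
          simp [h1, h2, hne]

theorem bBuild_eq (s : List Char) (cuts : List Nat) : ∀ (start : Nat), CutsLE s cuts start →
    bBuild s (cuts ++ [s.length]) start
      = ((((segsFrom s cuts start).map PySem.Chars.strip).filter
            (fun t => !t.isEmpty)).filter aKeep).map String.mk := by
  induction cuts with
  | nil =>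
      intro start _
      have hsl : PySem.List.slice s (some (start : Int)) (some (s.length : Int))
          = (s.drop start).take (s.length - start) := PySem.List.slice_natCast s start s.length
      have htk : (s.drop start).take (s.length - start) = s.drop start :=
        List.take_of_length_le (by simp)
      simp only [List.nil_append, bBuild, segsFrom, hsl, htk, List.map_cons, List.map_nil]
      set t := PySem.Chars.strip (s.drop start) with ht
      by_cases hne : t = []
      · simp [hne]
      · have hie : t.isEmpty = false := by simp [hne]
        have hk := keep_eq t
        by_cases hco : bCommentsOnly t = true
        · have ha : aKeep t = false := by rw [hk, hco]; rfl
          simp [hne, hco, hie, ha]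
        · simp only [Bool.not_eq_true] at hco
          have ha : aKeep t = true := by rw [hk, hco]; rfl
          simp [hne, hco, hie, ha]
  | cons k rest ih =>
      intro start hc
      obtain ⟨h1, h2, h3⟩ := hc
      have hsl : PySem.List.slice s (some (start : Int)) (some (k : Int))
          = (s.drop start).take (k - start) := PySem.List.slice_natCast s start k
      simp only [List.cons_append, bBuild, segsFrom, hsl, List.map_cons]
      rw [ih (k + 1) h3]
      set t := PySem.Chars.strip ((s.drop start).take (k - start)) with ht
      by_cases hne : t = []
      · simp [hne]
      · have hie : t.isEmpty = false := by simp [hne]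
        have hk := keep_eq t
        by_cases hco : bCommentsOnly t = true
        · have ha : aKeep t = false := by rw [hk, hco]; rfl
          simp [hne, hco, hie, ha]
        · simp only [Bool.not_eq_true] at hco
          have ha : aKeep t = true := by rw [hk, hco]; rfl
          simp [hne, hco, hie, ha]

theorem strip_nil_space (s : List Char) (h : PySem.Chars.strip s = []) :
    ∀ c ∈ s, PySem.Chars.isspace c = true := by
  
  intro c hc
  unfold PySem.Chars.strip PySem.Chars.rstrip PySem.Chars.lstrip at h
  rw [List.reverse_eq_nil_iff, List.dropWhile_eq_nil_iff] at h
  have hc' : c ∈ List.takeWhile PySem.Chars.isspace s ++ List.dropWhile PySem.Chars.isspace s := by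
    rw [List.takeWhile_append_dropWhile]; exact hc
  rcases List.mem_append.1 hc' with h1 | h2
  · exact List.mem_takeWhile_imp h1
  · exact h _ (List.mem_reverse.2 h2)

theorem bCuts_space (s : List Char) (hs : ∀ c ∈ s, PySem.Chars.isspace c = true) (i : Nat) :
    bCuts s i = [] := by
  
  fun_induction bCuts s i with
  | case1 i h1 c hg ih =>
      exfalso
      have hm : c ∈ s := by
        have he : s.getD i ' ' = s[i] := List.getD_eq_getElem s ' ' h1
        rw [show c = s.getD i ' ' from rfl, he]
        exact List.getElem_mem h1
      have := hs c hm
      rcases hg.1 with h2 | h2 <;> rw [h2] at this <;> simp [PySem.Chars.isspace] at this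
  | case2 i h1 c hg hsemi ih =>
      exfalso
      have hm : c ∈ s := by
        have he : s.getD i ' ' = s[i] := List.getD_eq_getElem s ' ' h1
        rw [show c = s.getD i ' ' from rfl, he]
        exact List.getElem_mem h1
      have := hs c hm
      rw [hsemi] at this
      simp [PySem.Chars.isspace] at this
  | case3 i h1 c hg hsemi ih => exact ih
  | case4 i h1 => rfl

-- ===== VERDICT (by name: the statement is the Claim_ definition above) =====
theorem split_cypher_statements_spec : Claim_equal_split_cypher_statements := by
  intro q _hdom
  unfold Spec_split_cypher_statements
  unfold split_cypher_statements split_cypher_statements_alt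
  show _ = bBuild q.toList (bCuts q.toList 0 ++ [q.toList.length]) 0
  by_cases h : PySem.Chars.strip q.toList = []
  · rw [if_pos h]
    rw [bCuts_space q.toList (strip_nil_space _ h) 0]
    simp only [List.nil_append, bBuild]
    have hsl : PySem.List.slice q.toList (some ((0 : Nat) : Int)) (some (q.toList.length : Int))
        = (q.toList.drop 0).take (q.toList.length - 0) :=
      PySem.List.slice_natCast q.toList 0 q.toList.length
    rw [hsl]
    simp only [List.drop_zero, Nat.sub_zero, List.take_length]
    simp [h]
  · rw [if_neg h]
    have hA := aLoop_pieces q.toList none [] [] false none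
    have hseg : pieces [] q.toList none false none
        = segsFrom q.toList (bCuts q.toList 0) 0 := by
      have h0 := pieces_segs q.toList 0 []
      rw [mapHead_nil] at h0
      simpa using h0
    rw [hseg] at hA
    rw [hA]
    simp only [List.nil_append]
    rw [bBuild_eq q.toList (bCuts q.toList 0) 0 (bCuts_cutsLE q.toList 0)]
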